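-- pv_equiv track=rewrite | github.com/aegntic/ideagen-app | connectors/integration_pipelines.py | _classify_product_type
-- ===== SOURCE A (Python) =====
-- from typing import Dict, List, Any, Optional
--
-- def _classify_product_type(tags: List[str]) -> str:
--     """Classify product type based on tags"""
--     if any(tag in tags for tag in ['saas', 'software', 'web app']):
--         return 'saas'
--     elif any(tag in tags for tag in ['mobile', 'ios', 'android']):
--         return 'mobile_app'
--     elif any(tag in tags for tag in ['api', 'developer', 'tool']):
--         return 'developer_tool'
--     elif any(tag in tags for tag in ['design', 'ui', 'ux']):
--         return 'design_tool'
--     else: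
--         return 'other'
-- ===== SOURCE B (Python) =====
-- _PRIO = {'saas': 0, 'software': 0, 'web app': 0,
--          'mobile': 1, 'ios': 1, 'android': 1,
--          'api': 2, 'developer': 2, 'tool': 2,
--          'design': 3, 'ui': 3, 'ux': 3}
-- _LABELS = ('saas', 'mobile_app', 'developer_tool', 'design_tool', 'other')
--
-- def _classify_product_type(tags):
--     """Classify product type based on tags"""
--     best = 4
--     for t in tags:
--         best = min(best, _PRIO.get(t, 4))
--     return _LABELS[best]
-- ===== Notes on version B (the rewrite author's own statement) =====
-- stated objective: alternative
-- what changed: Replaces the four if-elif keyword-membership scans over the tag list with a single pass over the tags that takes the minimum priority from a keyword->priority dict and indexes a label table.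
import Mathlib
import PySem

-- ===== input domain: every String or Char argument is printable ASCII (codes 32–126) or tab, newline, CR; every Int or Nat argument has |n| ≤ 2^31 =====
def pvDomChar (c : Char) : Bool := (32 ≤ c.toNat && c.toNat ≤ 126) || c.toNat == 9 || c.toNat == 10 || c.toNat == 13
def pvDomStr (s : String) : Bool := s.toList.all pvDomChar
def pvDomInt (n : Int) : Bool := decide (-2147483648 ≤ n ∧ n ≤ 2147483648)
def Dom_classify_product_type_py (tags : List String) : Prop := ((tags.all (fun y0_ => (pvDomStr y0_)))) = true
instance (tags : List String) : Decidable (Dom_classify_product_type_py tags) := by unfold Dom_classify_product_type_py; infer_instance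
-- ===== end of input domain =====

-- B replaces A's four if-elif keyword scans by one pass taking the minimum priority of the tags; return values are identical.

-- ===== PORT A =====
def classify_product_type_py (tags : List String) : String :=
  if tags.contains "saas" || tags.contains "software" || tags.contains "web app" then "saas"
  else if tags.contains "mobile" || tags.contains "ios" || tags.contains "android" then "mobile_app"
  else if tags.contains "api" || tags.contains "developer" || tags.contains "tool" then "developer_tool"
  else if tags.contains "design" || tags.contains "ui" || tags.contains "ux" then "design_tool"
  else "other"

-- ===== PORT B =====
-- the _PRIO dict lookup with default 4
def pvPrio (t : String) : Nat :=
  if t == "saas" || t == "software" || t == "web app" then 0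
  else if t == "mobile" || t == "ios" || t == "android" then 1
  else if t == "api" || t == "developer" || t == "tool" then 2
  else if t == "design" || t == "ui" || t == "ux" then 3
  else 4

-- the _LABELS table indexing
def pvLabel (k : Nat) : String :=
  if k = 0 then "saas" else if k = 1 then "mobile_app"
  else if k = 2 then "developer_tool" else if k = 3 then "design_tool" else "other"

def classify_product_type_py_alt (tags : List String) : String :=
  pvLabel (tags.foldl (fun b t => min b (pvPrio t)) 4)

-- ===== PRECONDITION & SPEC =====
def Spec_classify_product_type_py (tags : List String) (out : String) : Prop := out = classify_product_type_py_alt tags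
instance (tags : List String) (out : String) : Decidable (Spec_classify_product_type_py tags out) := by unfold Spec_classify_product_type_py; infer_instance

-- ===== CLAIM (what is proved, stated in full; the proofs are below) =====
def Claim_equal_classify_product_type_py : Prop := ∀ (tags : List String), Dom_classify_product_type_py tags → Spec_classify_product_type_py tags (classify_product_type_py tags)

-- ===== LEMMAS AND PROOFS =====
theorem pvFoldl_min_le (tags : List String) (b k : Nat) :
    tags.foldl (fun b t => min b (pvPrio t)) b ≤ k ↔ b ≤ k ∨ ∃ t ∈ tags, pvPrio t ≤ k := by
  induction tags generalizing b with
  | nil => simp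
  | cons h t ih =>
    rw [List.foldl_cons, ih, min_le_iff]
    simp only [List.mem_cons]
    aesop

theorem pvPrio_le_zero (t : String) : pvPrio t ≤ 0 ↔ (t = "saas" ∨ t = "software" ∨ t = "web app") := by
  unfold pvPrio; split_ifs with h1 h2 h3 h4 <;> simp_all <;> tauto

theorem pvPrio_le_one (t : String) :
    pvPrio t ≤ 1 ↔ (t = "saas" ∨ t = "software" ∨ t = "web app" ∨ t = "mobile" ∨ t = "ios" ∨ t = "android") := by
  unfold pvPrio; split_ifs with h1 h2 h3 h4 <;> simp_all <;> tauto

theorem pvPrio_le_two (t : String) :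
    pvPrio t ≤ 2 ↔ (t = "saas" ∨ t = "software" ∨ t = "web app" ∨ t = "mobile" ∨ t = "ios" ∨ t = "android" ∨ t = "api" ∨ t = "developer" ∨ t = "tool") := by
  unfold pvPrio; split_ifs with h1 h2 h3 h4 <;> simp_all <;> tauto

theorem pvPrio_le_three (t : String) :
    pvPrio t ≤ 3 ↔ (t = "saas" ∨ t = "software" ∨ t = "web app" ∨ t = "mobile" ∨ t = "ios" ∨ t = "android" ∨ t = "api" ∨ t = "developer" ∨ t = "tool" ∨ t = "design" ∨ t = "ui" ∨ t = "ux") := by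
  unfold pvPrio; split_ifs with h1 h2 h3 h4 <;> simp_all <;> tauto

-- ===== VERDICT (by name: the statement is the Claim_ definition above) =====
theorem classify_product_type_py_spec : Claim_equal_classify_product_type_py := by
  intro tags _
  unfold Spec_classify_product_type_py classify_product_type_py classify_product_type_py_alt
  set g := tags.foldl (fun b t => min b (pvPrio t)) 4 with hg
  have H : ∀ k : Nat, k ≤ 3 → (g ≤ k ↔ ∃ t ∈ tags, pvPrio t ≤ k) := by
    intro k hk
    rw [hg, pvFoldl_min_le]
    have h4 : ¬ (4 ≤ k) := by omega
    simp [h4]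
  split_ifs with h0 h1 h2 h3
  · -- group 0 present
    have : g ≤ 0 := by
      rw [H 0 (by omega)]
      simp only [List.contains_iff_mem, Bool.or_eq_true] at h0
      rcases h0 with (h | h) | h
      · exact ⟨_, h, (pvPrio_le_zero _).mpr (Or.inl rfl)⟩
      · exact ⟨_, h, (pvPrio_le_zero _).mpr (Or.inr (Or.inl rfl))⟩
      · exact ⟨_, h, (pvPrio_le_zero _).mpr (Or.inr (Or.inr rfl))⟩
    have hgz : g = 0 := Nat.le_zero.mp this
    simp [pvLabel, hgz]
  · -- group 1
    simp only [List.contains_iff_mem, Bool.or_eq_true, not_or] at h0 h1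
    have hle : g ≤ 1 := by
      rw [H 1 (by omega)]
      rcases h1 with (h | h) | h
      · exact ⟨_, h, (pvPrio_le_one _).mpr (by tauto)⟩
      · exact ⟨_, h, (pvPrio_le_one _).mpr (by tauto)⟩
      · exact ⟨_, h, (pvPrio_le_one _).mpr (by tauto)⟩
    have hnot : ¬ g ≤ 0 := by
      rw [H 0 (by omega)]
      rintro ⟨t, ht, hpt⟩
      rcases (pvPrio_le_zero t).mp hpt with rfl | rfl | rfl <;> tauto
    have hgz : g = 1 := by omega
    simp [pvLabel, hgz]
  · -- group 2
    simp only [List.contains_iff_mem, Bool.or_eq_true, not_or] at h0 h1 h2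
    have hle : g ≤ 2 := by
      rw [H 2 (by omega)]
      rcases h2 with (h | h) | h
      · exact ⟨_, h, (pvPrio_le_two _).mpr (by tauto)⟩
      · exact ⟨_, h, (pvPrio_le_two _).mpr (by tauto)⟩
      · exact ⟨_, h, (pvPrio_le_two _).mpr (by tauto)⟩
    have hnot : ¬ g ≤ 1 := by
      rw [H 1 (by omega)]
      rintro ⟨t, ht, hpt⟩
      rcases (pvPrio_le_one t).mp hpt with rfl | rfl | rfl | rfl | rfl | rfl <;> tauto
    have hgz : g = 2 := by omega
    simp [pvLabel, hgz]
  · -- group 3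
    simp only [List.contains_iff_mem, Bool.or_eq_true, not_or] at h0 h1 h2 h3
    have hle : g ≤ 3 := by
      rw [H 3 (by omega)]
      rcases h3 with (h | h) | h
      · exact ⟨_, h, (pvPrio_le_three _).mpr (by tauto)⟩
      · exact ⟨_, h, (pvPrio_le_three _).mpr (by tauto)⟩
      · exact ⟨_, h, (pvPrio_le_three _).mpr (by tauto)⟩
    have hnot : ¬ g ≤ 2 := by
      rw [H 2 (by omega)]
      rintro ⟨t, ht, hpt⟩
      rcases (pvPrio_le_two t).mp hpt with rfl | rfl | rfl | rfl | rfl | rfl | rfl | rfl | rfl <;> tauto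
    have hgz : g = 3 := by omega
    simp [pvLabel, hgz]
  · -- none
    simp only [List.contains_iff_mem, Bool.or_eq_true, not_or] at h0 h1 h2 h3
    have hnot : ¬ g ≤ 3 := by
      rw [H 3 (by omega)]
      rintro ⟨t, ht, hpt⟩
      rcases (pvPrio_le_three t).mp hpt with rfl | rfl | rfl | rfl | rfl | rfl | rfl | rfl | rfl | rfl | rfl | rfl <;> tauto
    unfold pvLabel
    have : g ≠ 0 ∧ g ≠ 1 ∧ g ≠ 2 ∧ g ≠ 3 := by omega
    simp [this.1, this.2.1, this.2.2.1, this.2.2.2]
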